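-- pv_equiv track=rewrite | github.com/Dimasik-DEV/Tasks_f11_f12_f13_f14 | Task_1_3.py | func
-- ===== SOURCE A (Python) =====
-- def func(n, m):
--     res_1 = 0
--     res_2 = 0
--
--     for i in range(1, n + 1):
--         for j in range(1, m + 1):
--             res_1 += i ** 5 - 48 * j ** 6
--             res_2 += 85 * j + j ** 6 + 25
--
--     return 69 * (res_1 + res_2)
-- ===== SOURCE B (Python) =====
-- def func(n, m):
--     # Closed-form (Faulhaber) power sums: O(1) instead of the O(n*m) double loop.
--     nn = n if n > 0 else 0
--     mm = m if m > 0 else 0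
--     s1 = mm * (mm + 1) // 2
--     s5 = nn * nn * (nn + 1) * (nn + 1) * (2 * nn * nn + 2 * nn - 1) // 12
--     s6 = mm * (mm + 1) * (2 * mm + 1) * (3 * mm ** 4 + 6 * mm ** 3 - 3 * mm + 1) // 42
--     return 69 * (mm * s5 + nn * (85 * s1 - 47 * s6 + 25 * mm))
-- ===== Notes on version B (the rewrite author's own statement) =====
-- stated objective: faster
-- what changed: Replaced the O(n*m) double loop with closed-form Faulhaber power-sum formulas (sums of j, j^5, j^6), computing the result in O(1) arithmetic.
import Mathlib
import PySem

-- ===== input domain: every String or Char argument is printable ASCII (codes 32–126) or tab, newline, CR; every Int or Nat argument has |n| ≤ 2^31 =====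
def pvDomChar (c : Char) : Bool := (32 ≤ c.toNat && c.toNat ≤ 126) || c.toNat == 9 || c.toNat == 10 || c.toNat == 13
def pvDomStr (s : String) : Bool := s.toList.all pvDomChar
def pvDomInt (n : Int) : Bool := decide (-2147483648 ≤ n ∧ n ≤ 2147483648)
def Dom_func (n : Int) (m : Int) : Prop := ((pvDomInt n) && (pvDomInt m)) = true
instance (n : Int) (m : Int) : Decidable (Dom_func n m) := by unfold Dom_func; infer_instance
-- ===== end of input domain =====

-- B replaces A's O(n*m) double loop by closed-form Faulhaber power-sum formulas (O(1)); objective: faster.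

-- ===== PORT A =====
def func (n : Int) (m : Int) : Int :=
  let r := (PySem.List.pyRange 1 (n + 1) 1).foldl
    (fun (r : Int × Int) i =>
      (PySem.List.pyRange 1 (m + 1) 1).foldl
        (fun (r : Int × Int) j =>
          (r.1 + (i ^ 5 - 48 * j ^ 6), r.2 + (85 * j + j ^ 6 + 25))) r)
    ((0 : Int), (0 : Int))
  69 * (r.1 + r.2)

-- ===== PORT B =====
def func_alt (n : Int) (m : Int) : Int :=
  let nn : Int := if n > 0 then n else 0
  let mm : Int := if m > 0 then m else 0
  let s1 := PySem.Int.floordiv (mm * (mm + 1)) 2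
  let s5 := PySem.Int.floordiv (nn * nn * (nn + 1) * (nn + 1) * (2 * nn * nn + 2 * nn - 1)) 12
  let s6 := PySem.Int.floordiv (mm * (mm + 1) * (2 * mm + 1) * (3 * mm ^ 4 + 6 * mm ^ 3 - 3 * mm + 1)) 42
  69 * (mm * s5 + nn * (85 * s1 - 47 * s6 + 25 * mm))

-- ===== PRECONDITION & SPEC =====
def Spec_func (n : Int) (m : Int) (out : Int) : Prop := out = func_alt n m
instance (n : Int) (m : Int) (out : Int) : Decidable (Spec_func n m out) := by unfold Spec_func; infer_instance

-- ===== CLAIM (what is proved, stated in full; the proofs are below) =====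
def Claim_equal_func : Prop := ∀ (n : Int) (m : Int), Dom_func n m → Spec_func n m (func n m)

-- ===== LEMMAS AND PROOFS =====

-- power sums over range(1, M+1)
def pvS1 (M : Nat) : Int := ((PySem.List.pyRange 1 ((M : Int) + 1) 1).map (fun j => j)).sum
def pvS5 (M : Nat) : Int := ((PySem.List.pyRange 1 ((M : Int) + 1) 1).map (fun j => j ^ 5)).sum
def pvS6 (M : Nat) : Int := ((PySem.List.pyRange 1 ((M : Int) + 1) 1).map (fun j => j ^ 6)).sum

lemma pvRange_succ (M : Nat) :
    PySem.List.pyRange 1 ((M : Int) + 1 + 1) 1 = PySem.List.pyRange 1 ((M : Int) + 1) 1 ++ [(M : Int) + 1] := by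
  exact PySem.List.pyRange_one_succ_right (by omega)

lemma pvS1_closed (M : Nat) : 2 * pvS1 M = (M : Int) * (M + 1) := by
  induction M with
  | zero => simp [pvS1]
  | succ k ih =>
      unfold pvS1 at *
      push_cast
      rw [pvRange_succ]
      simp only [List.map_append, List.sum_append, List.map_cons, List.sum_cons, List.map_nil, List.sum_nil]
      linear_combination ih

lemma pvS5_closed (M : Nat) :
    12 * pvS5 M = (M : Int) * M * (M + 1) * (M + 1) * (2 * M * M + 2 * M - 1) := by
  induction M with
  | zero => simp [pvS5]
  | succ k ih =>
      unfold pvS5 at *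
      push_cast
      rw [pvRange_succ]
      simp only [List.map_append, List.sum_append, List.map_cons, List.sum_cons, List.map_nil, List.sum_nil]
      linear_combination ih

lemma pvS6_closed (M : Nat) :
    42 * pvS6 M = (M : Int) * (M + 1) * (2 * M + 1) * (3 * (M:Int) ^ 4 + 6 * (M:Int) ^ 3 - 3 * M + 1) := by
  induction M with
  | zero => simp [pvS6]
  | succ k ih =>
      unfold pvS6 at *
      push_cast
      rw [pvRange_succ]
      simp only [List.map_append, List.sum_append, List.map_cons, List.sum_cons, List.map_nil, List.sum_nil]
      linear_combination ih

-- a foldl over a pair of independent accumulators is a pair of sums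
lemma pvFoldl_pair (f g : Int → Int) (l : List Int) (r : Int × Int) :
    l.foldl (fun (r : Int × Int) j => (r.1 + f j, r.2 + g j)) r
      = (r.1 + (l.map f).sum, r.2 + (l.map g).sum) := by
  induction l generalizing r with
  | nil => simp
  | cons x xs ih =>
      simp only [List.foldl_cons, List.map_cons, List.sum_cons, ih]
      simp only [Prod.mk.injEq]
      constructor <;> ring

-- the range in A only depends on toNat of the bound
lemma pvRange_toNat (n : Int) :
    PySem.List.pyRange 1 (n + 1) 1 = PySem.List.pyRange 1 ((n.toNat : Int) + 1) 1 := by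
  by_cases h : 0 < n
  · rw [Int.toNat_of_nonneg (le_of_lt h)]
  · rw [PySem.List.pyRange_one_eq_nil (by omega),
        PySem.List.pyRange_one_eq_nil (by omega)]

lemma pvFloordiv_exact (a q b : Int) (hb : 0 < b) (h : a = b * q) :
    PySem.Int.floordiv a b = q := by
  rw [PySem.Int.floordiv_eq_ediv_of_pos hb, h, Int.mul_ediv_cancel_left _ (by omega)]

-- the inner row sums, in closed form over pvS*
lemma pvInner1 (M : Nat) (i : Int) :
    ((PySem.List.pyRange 1 ((M : Int) + 1) 1).map (fun j => i ^ 5 - 48 * j ^ 6)).sum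
      = (M : Int) * i ^ 5 - 48 * pvS6 M := by
  induction M with
  | zero => simp [pvS6]
  | succ k ih =>
      unfold pvS6 at *
      push_cast
      rw [pvRange_succ]
      simp only [List.map_append, List.sum_append, List.map_cons, List.sum_cons, List.map_nil, List.sum_nil]
      linear_combination ih

lemma pvInner2 (M : Nat) :
    ((PySem.List.pyRange 1 ((M : Int) + 1) 1).map (fun j => 85 * j + j ^ 6 + 25)).sum
      = 85 * pvS1 M + pvS6 M + 25 * M := by
  induction M with
  | zero => simp [pvS1, pvS6]
  | succ k ih =>
      unfold pvS1 pvS6 at *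
      push_cast
      rw [pvRange_succ]
      simp only [List.map_append, List.sum_append, List.map_cons, List.sum_cons, List.map_nil, List.sum_nil]
      linear_combination ih

lemma pvOuter (N M : Nat) :
    ((PySem.List.pyRange 1 ((N : Int) + 1) 1).map (fun i => (M : Int) * i ^ 5 - 48 * pvS6 M)).sum
      = (M : Int) * pvS5 N - 48 * pvS6 M * N := by
  induction N with
  | zero => simp [pvS5]
  | succ k ih =>
      unfold pvS5 at *
      push_cast
      rw [pvRange_succ]
      simp only [List.map_append, List.sum_append, List.map_cons, List.sum_cons, List.map_nil, List.sum_nil]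
      linear_combination ih

lemma pvConstSum (N : Nat) (c : Int) :
    ((PySem.List.pyRange 1 ((N : Int) + 1) 1).map (fun _ => c)).sum = N * c := by
  induction N with
  | zero => simp
  | succ k ih =>
      push_cast
      rw [pvRange_succ]
      simp only [List.map_append, List.sum_append, List.map_cons, List.sum_cons, List.map_nil, List.sum_nil]
      linear_combination ih

-- ===== VERDICT (by name: the statement is the Claim_ definition above) =====
theorem func_spec : Claim_equal_func := by
  intro n m _
  simp only [Spec_func, func, func_alt]
  set N := n.toNat with hN
  set M := m.toNat with hM
  rw [pvRange_toNat n, pvRange_toNat m]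
  have hnn : (if n > 0 then n else 0) = (N : Int) := by
    by_cases h : 0 < n <;> simp [h, hN] <;> omega
  have hmm : (if m > 0 then m else 0) = (M : Int) := by
    by_cases h : 0 < m <;> simp [h, hM] <;> omega
  rw [hnn, hmm]
  have hinner : (fun (r : Int × Int) (i : Int) =>
      (PySem.List.pyRange 1 ((M : Int) + 1) 1).foldl
        (fun (r : Int × Int) j => (r.1 + (i ^ 5 - 48 * j ^ 6), r.2 + (85 * j + j ^ 6 + 25))) r)
      = fun (r : Int × Int) (i : Int) =>
        (r.1 + ((M : Int) * i ^ 5 - 48 * pvS6 M), r.2 + (85 * pvS1 M + pvS6 M + 25 * M)) := by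
    funext r i
    rw [pvFoldl_pair (fun j => i ^ 5 - 48 * j ^ 6) (fun j => 85 * j + j ^ 6 + 25),
        pvInner1, pvInner2]
  rw [hinner,
      pvFoldl_pair (fun i => (M : Int) * i ^ 5 - 48 * pvS6 M) (fun _ => 85 * pvS1 M + pvS6 M + 25 * M),
      pvOuter, pvConstSum]
  rw [pvFloordiv_exact _ (pvS1 M) 2 (by norm_num) (by linear_combination -pvS1_closed M),
      pvFloordiv_exact _ (pvS5 N) 12 (by norm_num) (by linear_combination -pvS5_closed N),
      pvFloordiv_exact _ (pvS6 M) 42 (by norm_num) (by linear_combination -pvS6_closed M)]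
  ring
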